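-- pv_equiv track=rewrite | github.com/DmitryLysohor/7 | pattern_finder.py | select_best_combo
-- ===== SOURCE A (Python) =====
-- def select_best_combo(combo_best: dict) -> tuple:
--     """
--     Из словаря {(cl, w): [...паттерны...]} выбирает пару (cl, w)
--     с наибольшим числом «хороших» паттернов.
--     Возвращает (best_cl, best_window, patterns_list).
--     """
--     best_count = -1
--     best_cl = None
--     best_w = None
--     best_list = []
--
--     for (cl, w), patterns in combo_best.items():
--         if len(patterns) > best_count:
--             best_count = len(patterns)
--             best_cl = cl
--             best_w = w
--             best_list = patterns.copy()
--
--     return best_cl, best_w, best_list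
-- ===== SOURCE B (Python) =====
-- def select_best_combo(combo_best: dict) -> tuple:
--     """Sort-then-index: stably sort items by descending pattern count
--     (negated length key keeps first-maximum on ties) and take the first."""
--     if not combo_best:
--         return None, None, []
--     items = sorted(combo_best.items(), key=lambda kv: -len(kv[1]))
--     (cl, w), patterns = items[0]
--     return cl, w, patterns.copy()
-- ===== Notes on version B (the rewrite author's own statement) =====
-- stated objective: alternative
-- what changed: Replaces the single-pass scan-and-track maximum loop with a stable sort of the items by negated pattern-list length followed by taking the first element (sort-then-index), which preserves A's first-maximum tie-breaking.
import Mathlib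
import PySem

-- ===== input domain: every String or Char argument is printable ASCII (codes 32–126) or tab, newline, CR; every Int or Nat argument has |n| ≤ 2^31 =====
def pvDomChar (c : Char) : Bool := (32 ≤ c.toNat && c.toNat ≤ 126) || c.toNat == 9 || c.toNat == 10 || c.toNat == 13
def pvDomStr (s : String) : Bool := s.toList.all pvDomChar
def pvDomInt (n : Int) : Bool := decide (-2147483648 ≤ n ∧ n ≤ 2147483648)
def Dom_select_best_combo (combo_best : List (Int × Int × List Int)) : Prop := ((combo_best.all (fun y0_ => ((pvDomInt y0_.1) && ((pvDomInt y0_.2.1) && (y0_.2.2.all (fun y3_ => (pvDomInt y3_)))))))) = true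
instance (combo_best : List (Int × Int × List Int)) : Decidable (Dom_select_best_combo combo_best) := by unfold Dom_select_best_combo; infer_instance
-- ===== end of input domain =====

-- B replaces A's scan-and-track maximum loop by a stable sort of the items on
-- negated pattern-count followed by taking the first element (alternative structure, not faster).


-- ===== PORT A =====
-- A's loop: running (best_count, best_cl, best_w, best_list), strict '>' update.
def select_best_combo (combo_best : List (Int × Int × List Int)) : Option Int × Option Int × List Int :=
  let st := combo_best.foldl
    (fun st kv =>
      if (kv.2.2.length : Int) > st.1 then
        ((kv.2.2.length : Int), some kv.1, some kv.2.1, kv.2.2)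
      else st)
    ((-1 : Int), (none : Option Int), (none : Option Int), ([] : List Int))
  (st.2.1, st.2.2.1, st.2.2.2)

-- ===== PORT B =====
-- B: stable sort by key -len(patterns), take the first item (Python's empty-dict
-- guard is the [] branch of the match: sorted list is [] iff the input is []).
def select_best_combo_alt (combo_best : List (Int × Int × List Int)) : Option Int × Option Int × List Int :=
  match PySem.List.sorted combo_best (fun kv => -(kv.2.2.length : Int)) with
  | [] => (none, none, [])
  | (cl, w, ps) :: _ => (some cl, some w, ps)

-- ===== PRECONDITION & SPEC =====
def Spec_select_best_combo (combo_best : List (Int × Int × List Int)) (out : Option Int × Option Int × List Int) : Prop := out = select_best_combo_alt combo_best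
instance (combo_best : List (Int × Int × List Int)) (out : Option Int × Option Int × List Int) : Decidable (Spec_select_best_combo combo_best out) := by unfold Spec_select_best_combo; infer_instance

-- ===== CLAIM (what is proved, stated in full; the proofs are below) =====
def Claim_equal_select_best_combo : Prop := ∀ (combo_best : List (Int × Int × List Int)), Dom_select_best_combo combo_best → Spec_select_best_combo combo_best (select_best_combo combo_best)

-- ===== LEMMAS AND PROOFS =====

-- A's loop step and B's sort key, named for the invariant.
def pvStep (st : Int × Option Int × Option Int × List Int) (kv : Int × Int × List Int) :
    Int × Option Int × Option Int × List Int :=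
  if (kv.2.2.length : Int) > st.1 then
    ((kv.2.2.length : Int), some kv.1, some kv.2.1, kv.2.2)
  else st

def pvKey (kv : Int × Int × List Int) : Int := -(kv.2.2.length : Int)

-- Invariant: on a nonempty prefix, A's running state is exactly the head of the
-- stable sort of that prefix (with its length as best_count).
theorem pv_invariant (xs : List (Int × Int × List Int)) :
    (xs = [] ∧ xs.foldl pvStep ((-1 : Int), none, none, ([] : List Int))
        = ((-1 : Int), none, none, ([] : List Int))) ∨
    ∃ m t, PySem.List.sorted xs pvKey = m :: t ∧
      xs.foldl pvStep ((-1 : Int), none, none, ([] : List Int))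
        = ((m.2.2.length : Int), some m.1, some m.2.1, m.2.2) := by
  induction xs using List.reverseRecOn with
  | nil => left; exact ⟨rfl, rfl⟩
  | append_singleton xs x ih =>
    right
    rw [List.foldl_append]
    rw [PySem.List.sorted_eq_foldl_insertBy, List.foldl_append,
        ← PySem.List.sorted_eq_foldl_insertBy]
    rcases ih with ⟨hnil, hst⟩ | ⟨m, t, hs, hst⟩
    · subst hnil
      refine ⟨x, [], rfl, ?_⟩
      simp only [List.foldl_nil]
      have h1 : ((x.2.2.length : Int)) > -1 := by omega
      simp [pvStep, h1]
    · rw [hs, hst]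
      simp only [List.foldl_cons, List.foldl_nil, PySem.List.insertBy]
      by_cases h : (x.2.2.length : Int) > (m.2.2.length : Int)
      · have hb : decide (pvKey x < pvKey m) = true := by
          simp only [pvKey, decide_eq_true_eq]; omega
        simp only [hb, if_true]
        refine ⟨x, m :: t, rfl, ?_⟩
        simp [pvStep, h]
      · have hb : decide (pvKey x < pvKey m) = false := by
          simp only [pvKey, decide_eq_false_iff_not, not_lt]; omega
        simp only [hb, Bool.false_eq_true, if_false]
        refine ⟨m, _, rfl, ?_⟩
        simp [pvStep, h]

-- ===== VERDICT (by name: the statement is the Claim_ definition above) =====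
theorem select_best_combo_spec : Claim_equal_select_best_combo := by
  intro xs _
  unfold Spec_select_best_combo select_best_combo select_best_combo_alt
  rcases pv_invariant xs with ⟨hnil, hst⟩ | ⟨m, t, hs, hst⟩
  · subst hnil; rfl
  · show _ = (match PySem.List.sorted xs pvKey with
      | [] => ((none : Option Int), (none : Option Int), ([] : List Int))
      | (cl, w, ps) :: _ => (some cl, some w, ps))
    rw [hs]
    show (xs.foldl pvStep _).2 = _
    rw [hst]
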